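-- pv_equiv track=rewrite | github.com/Fondamenti18/fondamenti-di-programmazione | students/1817406/homework01/program01.py | modi
-- ===== SOURCE A (Python) =====
-- def x_primo(x):
--     for i in range(2, x):
--         if x % i == 0:
--             return False
--     return True
--
-- def modi(ls, k):
--     lista_k = modi_2(ls)
--     #crea la lista vuota per mettere i numeri primi
--     lista_primi = []
--     for x in ls:
--         i = x - 1
--         acc = 0
--         #definiamo la condizione per i numeri primi:
--         while i > 1 and acc <= k:
--             resto = x % i
--             i -= 1
--             if resto == 0:
--                 acc += 1
--         if acc == k:
--             lista_primi = lista_primi + [x]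
--     return lista_primi, lista_k
--
-- def modi_2(ls):
--     lista_k = []
--     #crea un'altra lista vuota per mettere i numeri con k divisori
--     for x in ls:
--         if x_primo(x):
--             lista_k = lista_k + [x]
--     return lista_k
-- ===== SOURCE B (Python) =====
-- def _proper_divisor_count(x):
--     # number of divisors of x strictly between 1 and x, counted in pairs up to sqrt(x)
--     if x < 2:
--         return 0
--     cnt = 0
--     d = 2
--     while d * d <= x:
--         if x % d == 0:
--             cnt += 1 if d * d == x else 2
--         d += 1
--     return cnt
--
-- def _is_prime(x):
--     d = 2
--     while d * d <= x:
--         if x % d == 0: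
--             return False
--         d += 1
--     return True
--
-- def modi(ls, k):
--     with_k_divisors = []
--     primes = []
--     for x in ls:
--         if _proper_divisor_count(x) == k:
--             with_k_divisors.append(x)
--         if x < 2 or _is_prime(x):
--             primes.append(x)
--     return with_k_divisors, primes
-- ===== Notes on version B (the rewrite author's own statement) =====
-- stated objective: faster
-- what changed: One pass over the list building both results, with divisor counting in pairs (d, x//d) and trial division both stopping at sqrt(x) instead of scanning every integer below x.
import Mathlib
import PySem

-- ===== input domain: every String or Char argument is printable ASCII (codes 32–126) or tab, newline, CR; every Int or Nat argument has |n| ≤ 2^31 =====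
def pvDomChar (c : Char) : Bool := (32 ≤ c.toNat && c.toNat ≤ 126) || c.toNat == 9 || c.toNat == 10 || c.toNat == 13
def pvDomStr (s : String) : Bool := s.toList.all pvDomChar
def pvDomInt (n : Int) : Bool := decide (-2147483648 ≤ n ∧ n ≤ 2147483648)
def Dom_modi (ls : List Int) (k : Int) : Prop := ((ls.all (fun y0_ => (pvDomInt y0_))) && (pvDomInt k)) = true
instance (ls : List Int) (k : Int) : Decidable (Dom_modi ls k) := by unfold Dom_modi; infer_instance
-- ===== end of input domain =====

-- B makes one pass over the list building both result lists, counting proper divisors in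
-- pairs (d, x/d) and trial-dividing for primality only up to sqrt(x), where A scans every
-- integer below x.

-- ===== PORT A =====
def xPrimo (x : Int) : Bool :=
  (PySem.List.pyRange 2 x 1).all (fun i => !(PySem.Int.mod x i == 0))

def modi2 (ls : List Int) : List Int :=
  ls.foldl (fun lista_k x => if xPrimo x then lista_k ++ [x] else lista_k) []

-- A's while loop: i counts down from x-1, acc counts the divisors found so far
def aLoop (x k i acc : Int) : Int :=
  if _h : 1 < i ∧ acc ≤ k then
    aLoop x k (i - 1) (if PySem.Int.mod x i == 0 then acc + 1 else acc)
  else acc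
termination_by i.toNat
decreasing_by omega

def modi (ls : List Int) (k : Int) : List Int × List Int :=
  let lista_k := modi2 ls
  let lista_primi :=
    ls.foldl (fun lista_primi x =>
      if aLoop x k (x - 1) 0 == k then lista_primi ++ [x] else lista_primi) []
  (lista_primi, lista_k)

-- ===== PORT B =====
-- B's divisor-counting loop: d runs up while d*d ≤ x, counting d and x/d together
def bDivLoop (x d cnt : Int) : Int :=
  if _h : d * d ≤ x then
    bDivLoop x (d + 1)
      (if PySem.Int.mod x d == 0 then (if d * d == x then cnt + 1 else cnt + 2) else cnt)
  else cnt
termination_by (x + 2 - d).toNat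
decreasing_by
  have hd : d ≤ x + 1 := by
    rcases le_or_gt d 1 with h1 | h1
    · nlinarith
    · nlinarith
  omega

def properDivisorCount (x : Int) : Int :=
  if x < 2 then 0 else bDivLoop x 2 0

def bPrimeLoop (x d : Int) : Bool :=
  if _h : d * d ≤ x then
    if PySem.Int.mod x d == 0 then false else bPrimeLoop x (d + 1)
  else true
termination_by (x + 2 - d).toNat
decreasing_by
  have hd : d ≤ x + 1 := by
    rcases le_or_gt d 1 with h1 | h1
    · nlinarith
    · nlinarith
  omega

def isPrime (x : Int) : Bool := bPrimeLoop x 2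

def modi_alt (ls : List Int) (k : Int) : List Int × List Int :=
  ls.foldl (fun p x =>
      (if properDivisorCount x == k then p.1 ++ [x] else p.1,
       if decide (x < 2) || isPrime x then p.2 ++ [x] else p.2))
    ([], [])

-- ===== PRECONDITION & SPEC =====
def Spec_modi (ls : List Int) (k : Int) (out : List Int × List Int) : Prop := out = modi_alt ls k
instance (ls : List Int) (k : Int) (out : List Int × List Int) : Decidable (Spec_modi ls k out) := by unfold Spec_modi; infer_instance

-- ===== CLAIM (what is proved, stated in full; the proofs are below) =====
def Claim_equal_modi : Prop := ∀ (ls : List Int) (k : Int), Dom_modi ls k → Spec_modi ls k (modi ls k)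

-- ===== LEMMAS AND PROOFS =====

-- number of divisors of x in [2, i], the quantity A's while loop accumulates
def intCnt (x i : Int) : Int :=
  if 1 < i then (if PySem.Int.mod x i == 0 then 1 else 0) + intCnt x (i - 1) else 0
termination_by i.toNat
decreasing_by omega

lemma intCnt_nonneg (x i : Int) : 0 ≤ intCnt x i := by
  induction i using intCnt.induct with
  | case1 i h ih => rw [intCnt]; split_ifs <;> omega
  | case2 i h => rw [intCnt]; simp [h]

-- A's early-exiting loop equals k exactly when the full divisor count does
lemma aLoop_eq (x k : Int) : ∀ (i acc : Int), 0 ≤ acc →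
    (aLoop x k i acc = k ↔ acc + intCnt x i = k) := by
  intro i acc
  induction i, acc using aLoop.induct (x := x) (k := k) with
  | case1 i acc h ih =>
    intro hacc
    rw [aLoop, dif_pos h, intCnt, if_pos h.1]
    simp only [dite_eq_ite] at ih
    have ih' := ih (by split_ifs <;> omega)
    rw [ih']
    split_ifs <;> omega
  | case2 i acc h =>
    intro hacc
    rw [aLoop, dif_neg h]
    rcases not_and_or.mp h with h1 | h2
    · rw [intCnt, if_neg h1]; omega
    · have := intCnt_nonneg x i; omega

-- Nat-level divisor count on [2, i]
def cntN (n : ℕ) : ℕ → ℕ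
  | 0 => 0
  | i + 1 => (if 2 ≤ i + 1 ∧ (i + 1) ∣ n then 1 else 0) + cntN n i

lemma intCnt_eq_cntN (x : Int) (hx : 0 ≤ x) : ∀ i : Int, intCnt x i = (cntN x.toNat i.toNat : Int) := by
  intro i
  induction i using intCnt.induct with
  | case1 i h ih =>
    rw [intCnt, if_pos h, ih]
    obtain ⟨m, hm⟩ : ∃ m : ℕ, i.toNat = m + 1 := ⟨i.toNat - 1, by omega⟩
    have hi : i = ((m + 1 : ℕ) : Int) := by omega
    have hxx : x = ((x.toNat : ℕ) : Int) := (Int.toNat_of_nonneg hx).symm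
    have hdvd : (i ∣ x) ↔ ((m + 1) ∣ x.toNat) := by
      rw [hi]; conv_lhs => rw [hxx]
      exact Int.natCast_dvd_natCast
    have him : (i - 1).toNat = m := by omega
    rw [hm, him, cntN]
    have h2 : 2 ≤ m + 1 := by omega
    have hmod : (PySem.Int.mod x i == 0) = true ↔ (m + 1) ∣ x.toNat := by
      rw [beq_iff_eq, PySem.Int.mod_eq_zero_iff_dvd]; exact hdvd
    by_cases hd : (m + 1) ∣ x.toNat
    · rw [if_pos (hmod.mpr hd), if_pos (And.intro h2 hd)]
      push_cast; ring
    · rw [if_neg (fun hc => hd (hmod.mp hc)), if_neg (fun hc => hd hc.2)]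
      push_cast; ring
  | case2 i h =>
    rw [intCnt, if_neg h]
    have : i.toNat = 0 ∨ i.toNat = 1 := by omega
    rcases this with h0 | h0 <;> simp [h0, cntN]

lemma cntN_card (n : ℕ) : ∀ i : ℕ, (cntN n i : ℕ) = ((Finset.Icc 2 i).filter (· ∣ n)).card := by
  intro i
  induction i with
  | zero => simp [cntN]
  | succ i ih =>
    rw [cntN, ih]
    by_cases h2 : 2 ≤ i + 1
    · rw [← Finset.insert_Icc_right_eq_Icc_add_one (by omega), Finset.filter_insert]
      by_cases hd : (i + 1) ∣ n
      · rw [if_pos ⟨h2, hd⟩, if_pos hd, Finset.card_insert_of_notMem (by simp [Finset.mem_Icc])]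
        omega
      · rw [if_neg (by tauto), if_neg hd]; omega
    · have hi : i = 0 := by omega
      subst hi
      simp

-- weight of a candidate small divisor in B's paired count
def wN (n j : ℕ) : ℕ := if j ∣ n then (if j * j = n then 1 else 2) else 0

lemma bDivLoop_eq (x : Int) (hx : 0 ≤ x) : ∀ (d cnt : Int), 1 ≤ d →
    bDivLoop x d cnt = cnt + ((∑ j ∈ Finset.Icc d.toNat (Nat.sqrt x.toNat), wN x.toNat j : ℕ) : Int) := by
  intro d cnt
  induction d, cnt using bDivLoop.induct (x := x) with
  | case1 d cnt hdd ih =>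
    intro hd1
    have hdn : ((d.toNat : ℤ)) = d := Int.toNat_of_nonneg (by omega)
    have hsq : d.toNat * d.toNat ≤ x.toNat := by
      have : (↑(d.toNat * d.toNat) : ℤ) ≤ (↑x.toNat : ℤ) := by
        push_cast; rw [hdn, Int.toNat_of_nonneg hx]; exact hdd
      exact_mod_cast this
    have hds : d.toNat ≤ Nat.sqrt x.toNat := Nat.le_sqrt.mpr hsq
    have hsplit : Finset.Icc d.toNat (Nat.sqrt x.toNat)
        = insert d.toNat (Finset.Icc (d.toNat + 1) (Nat.sqrt x.toNat)) := by
      ext j; simp only [Finset.mem_Icc, Finset.mem_insert]; omega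
    have hnotmem : d.toNat ∉ Finset.Icc (d.toNat + 1) (Nat.sqrt x.toNat) := by
      simp only [Finset.mem_Icc]; omega
    have hd1n : (d + 1).toNat = d.toNat + 1 := by omega
    have hmod : (PySem.Int.mod x d == 0) = true ↔ d.toNat ∣ x.toNat := by
      rw [beq_iff_eq, PySem.Int.mod_eq_zero_iff_dvd]
      constructor
      · intro hv
        exact Int.natCast_dvd_natCast.mp (by rw [hdn, Int.toNat_of_nonneg hx]; exact hv)
      · intro hv
        have := Int.natCast_dvd_natCast.mpr hv
        rw [hdn, Int.toNat_of_nonneg hx] at this; exact this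
    have heq : (d * d == x) = true ↔ d.toNat * d.toNat = x.toNat := by
      rw [beq_iff_eq]
      constructor
      · intro hv
        have h2 : ((d.toNat * d.toNat : ℕ) : ℤ) = ((x.toNat : ℕ) : ℤ) := by
          push_cast; rw [hdn, Int.toNat_of_nonneg hx]; exact hv
        exact_mod_cast h2
      · intro hv
        have : (↑(d.toNat * d.toNat) : ℤ) = (↑x.toNat : ℤ) := by exact_mod_cast hv
        rw [Nat.cast_mul, hdn, Int.toNat_of_nonneg hx] at this; exact this
    rw [bDivLoop, dif_pos hdd]
    simp only [dite_eq_ite] at ih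
    rw [ih (by omega), hd1n, hsplit, Finset.sum_insert hnotmem]
    unfold wN
    by_cases h1 : d.toNat ∣ x.toNat
    · by_cases h2 : d.toNat * d.toNat = x.toNat
      · rw [if_pos (hmod.mpr h1), if_pos (heq.mpr h2), if_pos h1, if_pos h2]
        push_cast; ring
      · rw [if_pos (hmod.mpr h1), if_neg (fun hc => h2 (heq.mp hc)), if_pos h1, if_neg h2]
        push_cast; ring
    · rw [if_neg (fun hc => h1 (hmod.mp hc)), if_neg h1]
      push_cast; ring
  | case2 d cnt hdd =>
    intro hd1
    have : Nat.sqrt x.toNat < d.toNat := by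
      by_contra hc
      have hc2 : d.toNat ≤ Nat.sqrt x.toNat := by omega
      have hsq : d.toNat * d.toNat ≤ x.toNat := Nat.le_sqrt.mp hc2
      have hdn : ((d.toNat : ℤ)) = d := Int.toNat_of_nonneg (by omega)
      have : (↑(d.toNat * d.toNat) : ℤ) ≤ (↑x.toNat : ℤ) := by exact_mod_cast hsq
      rw [Nat.cast_mul, hdn, Int.toNat_of_nonneg hx] at this
      exact hdd this
    rw [bDivLoop, dif_neg hdd, Finset.Icc_eq_empty (by omega), Finset.sum_empty]
    simp

lemma bPrimeLoop_eq (x : Int) (hx : 0 ≤ x) : ∀ d : Int, 1 ≤ d →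
    bPrimeLoop x d = decide (∀ j ∈ Finset.Icc d.toNat (Nat.sqrt x.toNat), ¬ j ∣ x.toNat) := by
  intro d
  induction d using bPrimeLoop.induct (x := x) with
  | case1 d hdd hmodc =>
    intro hd1
    have hdn : ((d.toNat : ℤ)) = d := Int.toNat_of_nonneg (by omega)
    have hsq : d.toNat * d.toNat ≤ x.toNat := by
      have : (↑(d.toNat * d.toNat) : ℤ) ≤ (↑x.toNat : ℤ) := by
        push_cast; rw [hdn, Int.toNat_of_nonneg hx]; exact hdd
      exact_mod_cast this
    have hdvd : d.toNat ∣ x.toNat := by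
      rw [beq_iff_eq, PySem.Int.mod_eq_zero_iff_dvd] at hmodc
      have h2 : ((d.toNat : ℕ) : ℤ) ∣ ((x.toNat : ℕ) : ℤ) := by
        rw [hdn, Int.toNat_of_nonneg hx]; exact hmodc
      exact Int.natCast_dvd_natCast.mp h2
    rw [bPrimeLoop, dif_pos hdd, if_pos hmodc]
    symm
    rw [decide_eq_false_iff_not]
    intro hall
    exact hall d.toNat (Finset.mem_Icc.mpr ⟨le_refl _, Nat.le_sqrt.mpr hsq⟩) hdvd
  | case2 d hdd hmodc ih =>
    intro hd1
    have hdn : ((d.toNat : ℤ)) = d := Int.toNat_of_nonneg (by omega)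
    have hnd : ¬ d.toNat ∣ x.toNat := by
      intro hv
      apply hmodc
      rw [beq_iff_eq, PySem.Int.mod_eq_zero_iff_dvd]
      have := Int.natCast_dvd_natCast.mpr hv
      rw [hdn, Int.toNat_of_nonneg hx] at this
      exact this
    have hd1n : (d + 1).toNat = d.toNat + 1 := by omega
    rw [bPrimeLoop, dif_pos hdd, if_neg hmodc, ih (by omega), hd1n]
    simp only [decide_eq_decide]
    constructor
    · intro hall j hj
      rcases eq_or_ne j d.toNat with rfl | hne
      · exact fun hv => hnd hv
      · exact hall j (by simp only [Finset.mem_Icc] at hj ⊢; omega)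
    · intro hall j hj
      exact hall j (by simp only [Finset.mem_Icc] at hj ⊢; omega)
  | case3 d hdd =>
    intro hd1
    have : Nat.sqrt x.toNat < d.toNat := by
      by_contra hc
      have hc2 : d.toNat ≤ Nat.sqrt x.toNat := by omega
      have hsq : d.toNat * d.toNat ≤ x.toNat := Nat.le_sqrt.mp hc2
      have hdn : ((d.toNat : ℤ)) = d := Int.toNat_of_nonneg (by omega)
      have : (↑(d.toNat * d.toNat) : ℤ) ≤ (↑x.toNat : ℤ) := by exact_mod_cast hsq
      rw [Nat.cast_mul, hdn, Int.toNat_of_nonneg hx] at this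
      exact hdd this
    rw [bPrimeLoop, dif_neg hdd, Finset.Icc_eq_empty (by omega)]
    simp

-- core counting identity: proper divisors counted one by one = counted in pairs up to sqrt
lemma card_eq_pair_sum (n : ℕ) (hn : 2 ≤ n) :
    ((Finset.Icc 2 (n - 1)).filter (· ∣ n)).card = ∑ j ∈ Finset.Icc 2 (Nat.sqrt n), wN n j := by
  have hn0 : n ≠ 0 := by omega
  set D := n.divisors with hD
  set L := D.filter (fun d => d * d < n) with hL
  set E := D.filter (fun d => d * d = n) with hE
  set G := D.filter (fun d => n < d * d) with hG
  have hmem : ∀ d ∈ D, d ∣ n ∧ 1 ≤ d ∧ d ≤ n := by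
    intro d hd
    rw [hD, Nat.mem_divisors] at hd
    exact ⟨hd.1, Nat.pos_of_dvd_of_pos hd.1 (by omega), Nat.le_of_dvd (by omega) hd.1⟩
  have hA : (Finset.Icc 2 (n - 1)).filter (· ∣ n) = (D.erase 1).erase n := by
    ext d
    simp only [Finset.mem_filter, Finset.mem_Icc, Finset.mem_erase, hD, Nat.mem_divisors]
    constructor
    · rintro ⟨⟨h2, h3⟩, h4⟩
      exact ⟨by omega, by omega, h4, hn0⟩
    · rintro ⟨h1, h2, h3, -⟩
      have := Nat.pos_of_dvd_of_pos h3 (by omega)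
      have := Nat.le_of_dvd (by omega) h3
      exact ⟨⟨by omega, by omega⟩, h3⟩
  have h1D : 1 ∈ D := by rw [hD, Nat.mem_divisors]; exact ⟨one_dvd n, hn0⟩
  have hnD : n ∈ D.erase 1 := by
    rw [Finset.mem_erase, hD, Nat.mem_divisors]; exact ⟨by omega, dvd_refl n, hn0⟩
  have hALHS : ((Finset.Icc 2 (n - 1)).filter (· ∣ n)).card = D.card - 2 := by
    rw [hA, Finset.card_erase_of_mem hnD, Finset.card_erase_of_mem h1D]
    omega
  have hB : (Finset.Icc 2 (Nat.sqrt n)).filter (· ∣ n) = (D.filter (fun d => d * d ≤ n)).erase 1 := by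
    ext d
    simp only [Finset.mem_filter, Finset.mem_Icc, Finset.mem_erase, hD, Nat.mem_divisors,
      ← Nat.le_sqrt]
    constructor
    · rintro ⟨⟨h2, h3⟩, h4⟩
      exact ⟨by omega, ⟨h4, hn0⟩, h3⟩
    · rintro ⟨h1, ⟨h3, -⟩, h5⟩
      have := Nat.pos_of_dvd_of_pos h3 (by omega)
      exact ⟨⟨by omega, h5⟩, h3⟩
  have hRHS : ∑ j ∈ Finset.Icc 2 (Nat.sqrt n), wN n j
      = ∑ j ∈ (Finset.Icc 2 (Nat.sqrt n)).filter (· ∣ n), (if j * j = n then 1 else 2) := by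
    rw [Finset.sum_filter]
    refine Finset.sum_congr rfl (fun j _ => ?_)
    unfold wN
    by_cases h : j ∣ n <;> simp [h]
  have hsplitset : (D.filter (fun d => d * d ≤ n)).erase 1 = (L.erase 1) ∪ E := by
    ext d
    simp only [Finset.mem_union, Finset.mem_erase, hL, hE, Finset.mem_filter]
    constructor
    · rintro ⟨h1, h2, h3⟩
      rcases eq_or_lt_of_le h3 with he | hlt
      · exact Or.inr ⟨h2, he⟩
      · exact Or.inl ⟨h1, h2, hlt⟩
    · rintro (⟨h1, h2, h3⟩ | ⟨h1, h2⟩)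
      · exact ⟨h1, h2, by omega⟩
      · refine ⟨?_, h1, by omega⟩
        intro hd1; rw [hd1] at h2; omega
  have hdisj : Disjoint (L.erase 1) E := by
    rw [Finset.disjoint_left]
    intro d hd1 hd2
    simp only [hL, hE, Finset.mem_erase, Finset.mem_filter] at hd1 hd2
    omega
  have h1L : 1 ∈ L := by
    rw [hL, Finset.mem_filter]; exact ⟨h1D, by omega⟩
  have hnG : n ∈ G := by
    rw [hG, Finset.mem_filter]
    refine ⟨by rw [hD, Nat.mem_divisors]; exact ⟨dvd_refl n, hn0⟩, by nlinarith⟩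
  have hRHS2 : ∑ j ∈ (Finset.Icc 2 (Nat.sqrt n)).filter (· ∣ n), (if j * j = n then 1 else 2)
      = 2 * (L.card - 1) + E.card := by
    rw [hB, hsplitset, Finset.sum_union hdisj]
    have e1 : ∑ j ∈ L.erase 1, (if j * j = n then 1 else 2) = 2 * (L.card - 1) := by
      rw [Finset.sum_congr rfl (fun j hj => ?_), Finset.sum_const, Finset.card_erase_of_mem h1L,
        smul_eq_mul, Nat.mul_comm]
      simp only [hL, Finset.mem_erase, Finset.mem_filter] at hj
      rw [if_neg (by omega)]
    have e2 : ∑ j ∈ E, (if j * j = n then (1:ℕ) else 2) = E.card := by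
      rw [Finset.sum_congr rfl (fun j hj => ?_), Finset.sum_const, smul_eq_mul, Nat.mul_one]
      simp only [hE, Finset.mem_filter] at hj
      rw [if_pos hj.2]
    rw [e1, e2]
  have hGL : G.card = L.card := by
    have hinv := Nat.sum_div_divisors n (fun d => if d * d < n then (1:ℕ) else 0)
    have hkey : ∀ d ∈ D, ((n / d) * (n / d) < n ↔ n < d * d) := by
      intro d hd
      obtain ⟨hdvd, hd1, hdn⟩ := hmem d hd
      have he : n / d * d = n := Nat.div_mul_cancel hdvd
      have he0 : 0 < n / d := Nat.div_pos hdn (by omega)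
      constructor
      · intro h; nlinarith
      · intro h; nlinarith
    have hcongr : ∑ d ∈ D, (if (n / d) * (n / d) < n then (1:ℕ) else 0)
        = ∑ d ∈ D, (if n < d * d then (1:ℕ) else 0) := by
      refine Finset.sum_congr rfl (fun d hd => ?_)
      by_cases h : n < d * d
      · rw [if_pos ((hkey d hd).mpr h), if_pos h]
      · rw [if_neg (fun hc => h ((hkey d hd).mp hc)), if_neg h]
    rw [hG, hL, Finset.card_filter, Finset.card_filter, ← hcongr, hinv]
  have hpart : L.card + E.card + G.card = D.card := by
    have htri : ∀ d : ℕ, (1:ℕ)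
        = (if d * d < n then 1 else 0) + (if d * d = n then 1 else 0) + (if n < d * d then 1 else 0) := by
      intro d
      rcases lt_trichotomy (d * d) n with h | h | h
      · rw [if_pos h, if_neg (by omega), if_neg (by omega)]
      · rw [if_neg (by omega), if_pos h, if_neg (by omega)]
      · rw [if_neg (by omega), if_neg (by omega), if_pos h]
    rw [hL, hE, hG, Finset.card_filter, Finset.card_filter, Finset.card_filter]
    calc ∑ d ∈ D, (if d * d < n then (1:ℕ) else 0) + ∑ d ∈ D, (if d * d = n then (1:ℕ) else 0)
          + ∑ d ∈ D, (if n < d * d then (1:ℕ) else 0)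
        = ∑ d ∈ D, ((if d * d < n then (1:ℕ) else 0) + (if d * d = n then 1 else 0)
            + (if n < d * d then 1 else 0)) := by rw [Finset.sum_add_distrib, Finset.sum_add_distrib]
      _ = ∑ d ∈ D, (1:ℕ) := (Finset.sum_congr rfl (fun d _ => (htri d).symm))
      _ = D.card := by rw [Finset.sum_const, smul_eq_mul, Nat.mul_one]
  have hL1 : 1 ≤ L.card := Finset.card_pos.mpr ⟨1, h1L⟩
  have hG1 : 1 ≤ G.card := Finset.card_pos.mpr ⟨n, hnG⟩
  rw [hALHS, hRHS, hRHS2]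
  omega

lemma count_pointwise (x k : Int) :
    (aLoop x k (x - 1) 0 == k) = (properDivisorCount x == k) := by
  rw [Bool.eq_iff_iff, beq_iff_eq, beq_iff_eq,
    aLoop_eq x k (x - 1) 0 (le_refl 0)]
  have hmain : intCnt x (x - 1) = properDivisorCount x := by
    by_cases hx2 : x < 2
    · rw [intCnt, if_neg (by omega), properDivisorCount, if_pos hx2]
    · have hx : 0 ≤ x := by omega
      have hn2 : 2 ≤ x.toNat := by omega
      have h1 : (x - 1).toNat = x.toNat - 1 := by omega
      rw [intCnt_eq_cntN x hx, h1, properDivisorCount, if_neg hx2,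
        bDivLoop_eq x hx 2 0 (by omega)]
      have h2 : ((2:ℤ)).toNat = 2 := rfl
      rw [h2, zero_add, cntN_card, card_eq_pair_sum x.toNat hn2]
  omega

lemma prime_pointwise (x : Int) : xPrimo x = (decide (x < 2) || isPrime x) := by
  by_cases hx2 : x < 2
  · rw [xPrimo, PySem.List.pyRange_one_eq_nil (by omega)]
    simp [hx2]
  · by_cases hx3 : x = 2
    · subst hx3
      rw [xPrimo, PySem.List.pyRange_one_eq_nil (by omega), isPrime, bPrimeLoop,
        dif_neg (by omega)]
      simp
    · have hx : 0 ≤ x := by omega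
      have hn3 : 3 ≤ x.toNat := by omega
      rw [Bool.eq_iff_iff]
      rw [isPrime, bPrimeLoop_eq x hx 2 (by omega)]
      have h2 : ((2:ℤ)).toNat = 2 := rfl
      rw [h2]
      simp only [xPrimo, List.all_eq_true, PySem.List.mem_pyRange_one, Bool.not_eq_eq_eq_not,
        Bool.not_true, beq_eq_false_iff_ne, ne_eq, Bool.or_eq_true, decide_eq_true_eq,
        Finset.mem_Icc]
      constructor
      · intro hall
        right
        have hp : x.toNat.Prime := by
          rw [Nat.prime_def_lt']
          refine ⟨by omega, fun m hm2 hmn hdvd => ?_⟩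
          have hmx : (m : ℤ) ∣ x := by
            have := Int.natCast_dvd_natCast.mpr hdvd
            rwa [Int.toNat_of_nonneg hx] at this
          exact hall (m : ℤ) ⟨by exact_mod_cast hm2, by omega⟩
            (by rw [PySem.Int.mod_eq_zero_iff_dvd]; exact hmx)
        intro j hj
        exact (Nat.prime_def_le_sqrt.mp hp).2 j hj.1 hj.2
      · rintro (h | hsq)
        · omega
        · have hp : x.toNat.Prime :=
            Nat.prime_def_le_sqrt.mpr ⟨by omega, fun m hm2 hms => hsq m ⟨hm2, hms⟩⟩
          intro i hi hmod
          rw [PySem.Int.mod_eq_zero_iff_dvd] at hmod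
          have hdvd : i.toNat ∣ x.toNat := by
            have h2 : ((i.toNat : ℕ) : ℤ) ∣ ((x.toNat : ℕ) : ℤ) := by
              rw [Int.toNat_of_nonneg (by omega : (0:ℤ) ≤ i), Int.toNat_of_nonneg hx]
              exact hmod
            exact Int.natCast_dvd_natCast.mp h2
          exact (Nat.prime_def_lt'.mp hp).2 i.toNat (by omega) (by omega) hdvd

-- ===== VERDICT (by name: the statement is the Claim_ definition above) =====
theorem modi_spec : Claim_equal_modi := by
  intro ls k _dom
  unfold Spec_modi modi modi_alt modi2
  rw [PySem.List.foldl_prod_mk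
      (f := fun acc e => if properDivisorCount e == k then acc ++ [e] else acc)
      (g := fun acc e => if decide (e < 2) || isPrime e then acc ++ [e] else acc)]
  simp only [PySem.List.foldl_append_if_eq_filter, List.nil_append]
  rw [List.filter_congr (fun x _ => count_pointwise x k),
      List.filter_congr (fun x _ => prime_pointwise x)]
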